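-- pv_equiv track=rewrite | github.com/rajnandinimukherjee/kpi-scattering | load_data.py | TC
-- ===== SOURCE A (Python) =====
-- import collections
--
-- def TC(files):
--     # returns a dictionary of configurations available for each time source from a list of files
--     TC = collections.defaultdict(list)
--     for name in files:
--         [t_src, cfnm] = name.rsplit('.')
--         TC[t_src].append(cfnm)
--     TC = collections.OrderedDict(sorted(TC.items()))
--     for k in TC.keys():
--         TC[k].sort()
--     return TC
-- ===== SOURCE B (Python) =====
-- import collections
--
-- def TC(files):
--     # Parse once into (t_src, cfnm) pairs, sort the pairs once (stable two-pass
--     # sort: secondary key, then primary key), then group in a single pass.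
--     pairs = []
--     for name in files:
--         [t_src, cfnm] = name.rsplit('.')
--         pairs.append((t_src, cfnm))
--     pairs.sort(key=lambda p: p[1])
--     pairs.sort(key=lambda p: p[0])
--     out = collections.OrderedDict()
--     for t_src, cfnm in pairs:
--         out.setdefault(t_src, []).append(cfnm)
--     return out
-- ===== Notes on version B (the rewrite author's own statement) =====
-- stated objective: alternative
-- what changed: A groups names into a defaultdict and then sorts the key list and each value list separately; B parses each name into a (t_src, cfnm) pair, sorts the pair list once (stable sort by secondary then primary key), and builds the ordered grouping in a single pass over the sorted pairs.
import Mathlib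
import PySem

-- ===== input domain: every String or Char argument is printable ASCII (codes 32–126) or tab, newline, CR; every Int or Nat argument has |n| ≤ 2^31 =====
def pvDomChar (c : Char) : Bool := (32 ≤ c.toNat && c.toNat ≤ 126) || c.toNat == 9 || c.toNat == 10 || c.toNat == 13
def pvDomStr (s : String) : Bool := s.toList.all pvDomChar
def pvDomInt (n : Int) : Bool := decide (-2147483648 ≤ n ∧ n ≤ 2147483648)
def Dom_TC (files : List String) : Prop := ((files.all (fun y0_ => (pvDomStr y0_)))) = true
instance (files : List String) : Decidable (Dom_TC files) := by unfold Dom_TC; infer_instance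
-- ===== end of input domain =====

-- B replaces A's group-then-sort-keys-then-sort-each-list by parse-into-pairs,
-- one stable two-pass sort of the pairs, and a single grouping pass (alternative decomposition, same cost).

-- the shared line "[t_src, cfnm] = name.rsplit('.')" of both Pythons: rsplit('.') with no
-- maxsplit is the same split as name.split('.'); the unpacking needs exactly two parts,
-- otherwise Python raises ValueError (none here; such inputs are excluded by Pre_TC)
def pvUnpack2? (n : String) : Option (String × String) :=
  match PySem.Str.split? n "." with
  | some [t_src, cfnm] => some (t_src, cfnm)
  | _ => none

-- ===== PORT A =====
def TC (files : List String) : List (String × List String) :=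
  let d := files.foldl (fun d name =>
      ((pvUnpack2? name).map (fun p => d.modify p.1 [] (fun l => l ++ [p.2]))).getD d
    ) PySem.Dict.empty
  -- sorted(TC.items()): dict keys are distinct, so Python's tuple comparison is decided by the key alone
  let itemsSorted := PySem.List.sorted d.items (fun p => p.1)
  -- for k in TC.keys(): TC[k].sort()
  itemsSorted.map (fun p => (p.1, PySem.List.sorted p.2 (fun x => x)))

-- ===== PORT B =====
def TC_alt (files : List String) : List (String × List String) :=
  let pairs := files.foldl (fun acc name =>
      ((pvUnpack2? name).map (fun p => acc ++ [p])).getD acc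
    ) ([] : List (String × String))
  let pairs1 := PySem.List.sorted pairs (fun p => p.2)   -- pairs.sort(key=lambda p: p[1])
  let pairs2 := PySem.List.sorted pairs1 (fun p => p.1)  -- pairs.sort(key=lambda p: p[0]) (stable)
  (pairs2.foldl (fun d p => d.modify p.1 [] (fun l => l ++ [p.2])) PySem.Dict.empty).items

-- ===== PRECONDITION & SPEC =====
-- Pre_TC excludes exactly the names on which A's unpacking of name.rsplit('.') raises ValueError
-- (names with no '.' or with more than one '.').
def Pre_TC (files : List String) : Prop :=
  ∀ name ∈ files, ((PySem.Str.split? name ".").getD []).length = 2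
instance (files : List String) : Decidable (Pre_TC files) := by unfold Pre_TC; infer_instance

def pvWitness_TC : List String := ["smeared.450", "point.400", "smeared.300"]

def Spec_TC (files : List String) (out : List (String × List String)) : Prop := out = TC_alt files
instance (files : List String) (out : List (String × List String)) : Decidable (Spec_TC files out) := by unfold Spec_TC; infer_instance

-- ===== CLAIM (what is proved, stated in full; the proofs are below) =====
def Claim_equal_TC : Prop := ∀ (files : List String), Dom_TC files → Pre_TC files → Spec_TC files (TC files)

-- ===== LEMMAS AND PROOFS =====

-- the (t_src, cfnm) pair of a well-formed name (both ports agree with it under Pre_TC)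
def pvParse (n : String) : String × String := (pvUnpack2? n).getD ("", "")

-- under Pre_TC every name unpacks
theorem pv_unpack_eq (n : String) (h2 : ((PySem.Str.split? n ".").getD []).length = 2) :
    pvUnpack2? n = some (pvParse n) := by
  unfold pvParse pvUnpack2?
  match hm : PySem.Str.split? n "." with
  | some [t, c] => simp
  | none => rw [hm] at h2; simp at h2
  | some [] => rw [hm] at h2; simp at h2
  | some [t] => rw [hm] at h2; simp at h2
  | some (t :: c :: x :: rest) => rw [hm] at h2; simp at h2

-- ofList (first-occurrence dedup) preserves any Pairwise relation
theorem pv_pairwise_ofList {α : Type} [BEq α] [LawfulBEq α] {R : α → α → Prop}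
    {l : List α} (h : l.Pairwise R) : (PySem.Set.ofList l).Pairwise R := by
  induction l with
  | nil => simp [PySem.Set.ofList_nil]
  | cons x xs ih =>
    rw [PySem.Set.ofList_cons]
    rcases List.pairwise_cons.mp h with ⟨hx, hxs⟩
    refine List.pairwise_cons.mpr ⟨?_, List.Pairwise.filter _ (ih hxs)⟩
    intro y hy
    have : y ∈ PySem.Set.ofList xs := List.mem_of_mem_filter hy
    exact hx y ((PySem.Set.mem_ofList xs y).mp this)

-- stability of sorted: inserting x into a key-nondecreasing list, the elements with key = k
theorem pv_filter_insertBy {α κ : Type} [LinearOrder κ] [BEq κ] [LawfulBEq κ]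
    (key : α → κ) (k : κ) (x : α) :
    ∀ (acc : List α), acc.Pairwise (fun a b => key a ≤ key b) →
    (PySem.List.insertBy (fun a b => decide (key a < key b)) x acc).filter (fun y => key y == k)
      = if key x == k then acc.filter (fun y => key y == k) ++ [x]
        else acc.filter (fun y => key y == k) := by
  intro acc
  induction acc with
  | nil =>
    intro _
    by_cases hk : key x == k <;> simp [PySem.List.insertBy, List.filter, hk]
  | cons y ys ih =>
    intro h
    rcases List.pairwise_cons.mp h with ⟨hy, hys⟩
    by_cases hlt : key x < key y
    · simp only [PySem.List.insertBy, hlt, decide_true, if_true]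
      by_cases hxk : (key x == k) = true
      · have hxval : key x = k := by simpa using hxk
        have hyk : (key y == k) = false := by
          simp only [beq_eq_false_iff_ne, ne_eq]
          intro hyval; rw [hyval, ← hxval] at hlt; exact lt_irrefl _ hlt
        have hnil : ys.filter (fun z => key z == k) = [] := by
          rw [List.filter_eq_nil_iff]
          intro z hz
          have hlez : key y ≤ key z := hy z hz
          have hltz : key x < key z := lt_of_lt_of_le hlt hlez
          simp only [beq_iff_eq]
          intro hzk; rw [hzk, ← hxval] at hltz; exact lt_irrefl _ hltz
        simp [List.filter, hxk, hyk, hnil]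
      · simp [List.filter, hxk]
    · simp only [PySem.List.insertBy, hlt, decide_false]
      have := ih hys
      by_cases hyk : key y == k <;> by_cases hxk : key x == k <;>
        simp [List.filter, hyk, hxk, this]

-- filtering on the sort key commutes with sorting by that key (stability of PySem's sort)
theorem pv_filter_sorted {α κ : Type} [LinearOrder κ] [BEq κ] [LawfulBEq κ]
    (key : α → κ) (k : κ) (xs : List α) :
    (PySem.List.sorted xs key).filter (fun y => key y == k) = xs.filter (fun y => key y == k) := by
  rw [PySem.List.sorted_eq_foldl_insertBy]
  suffices h : ∀ (l acc : List α), acc.Pairwise (fun a b => key a ≤ key b) →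
      (l.foldl (fun acc x => PySem.List.insertBy (fun a b => decide (key a < key b)) x acc) acc).filter
          (fun y => key y == k)
        = acc.filter (fun y => key y == k) ++ l.filter (fun y => key y == k) by
    simpa using h xs [] (by simp)
  intro l
  induction l with
  | nil => intro acc _; simp
  | cons x t ih =>
    intro acc hacc
    simp only [List.foldl_cons]
    rw [ih _ (PySem.List.insertBy_pairwise_le key x acc hacc),
        pv_filter_insertBy key k x acc hacc]
    by_cases hxk : key x == k <;> simp [List.filter, hxk]

-- Nodup + Pairwise ≤ gives Pairwise <
theorem pv_pairwise_lt_of_le_nodup {κ : Type} [LinearOrder κ] {l : List κ}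
    (hle : l.Pairwise (· ≤ ·)) (hnd : l.Nodup) : l.Pairwise (· < ·) :=
  (hle.and hnd).imp (fun h => lt_of_le_of_ne h.1 h.2)

-- the grouping computation both ports share, as a function of the parsed pair list
theorem pv_group_eq (ps : List (String × String)) :
    (PySem.List.sorted
        (ps.foldl (fun d p => d.modify p.1 [] (fun l => l ++ [p.2])) PySem.Dict.empty).items
        (fun p => p.1)).map (fun p => (p.1, PySem.List.sorted p.2 (fun x => x)))
      = ((PySem.List.sorted (PySem.List.sorted ps (fun p => p.2)) (fun p => p.1)).foldl
          (fun d p => d.modify p.1 [] (fun l => l ++ [p.2])) PySem.Dict.empty).items := by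
  set qs := PySem.List.sorted (PySem.List.sorted ps (fun p => p.2)) (fun p => p.1) with hqs
  have hqsperm : qs.Perm ps :=
    (PySem.List.sorted_perm _ _ _).trans (PySem.List.sorted_perm _ _ _)
  -- characterise the two dicts
  have hkeysA : (ps.foldl (fun d p => d.modify p.1 [] (fun l => l ++ [p.2])) PySem.Dict.empty).keys
      = PySem.Set.ofList (ps.map (fun p => p.1)) := by
    rw [PySem.Dict.keys_foldl_modify_key ps (fun p => p.1) [] (fun _ p l => l ++ [p.2])]
    simp [PySem.Dict.keys_empty, PySem.Set.update_eq_foldl, PySem.Set.ofList_eq_foldl]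
  have hkeysB : (qs.foldl (fun d p => d.modify p.1 [] (fun l => l ++ [p.2])) PySem.Dict.empty).keys
      = PySem.Set.ofList (qs.map (fun p => p.1)) := by
    rw [PySem.Dict.keys_foldl_modify_key qs (fun p => p.1) [] (fun _ p l => l ++ [p.2])]
    simp [PySem.Dict.keys_empty, PySem.Set.update_eq_foldl, PySem.Set.ofList_eq_foldl]
  have hndA : (ps.foldl (fun d p => d.modify p.1 [] (fun l => l ++ [p.2])) PySem.Dict.empty).keys.Nodup := by
    rw [hkeysA]; exact PySem.Set.nodup_ofList _
  have hndB : (qs.foldl (fun d p => d.modify p.1 [] (fun l => l ++ [p.2])) PySem.Dict.empty).keys.Nodup := by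
    rw [hkeysB]; exact PySem.Set.nodup_ofList _
  have hgetA : ∀ k, (ps.foldl (fun d p => d.modify p.1 [] (fun l => l ++ [p.2])) PySem.Dict.empty).getD k []
      = (ps.filter (fun p => p.1 == k)).map (fun p => p.2) := by
    intro k
    rw [PySem.Dict.getD_foldl_modify_append ps PySem.Dict.empty k]
    simp
  have hgetB : ∀ k, (qs.foldl (fun d p => d.modify p.1 [] (fun l => l ++ [p.2])) PySem.Dict.empty).getD k []
      = (qs.filter (fun p => p.1 == k)).map (fun p => p.2) := by
    intro k
    rw [PySem.Dict.getD_foldl_modify_append qs PySem.Dict.empty k]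
    simp
  rw [PySem.Dict.items_eq_map_keys _ hndA [], PySem.Dict.items_eq_map_keys _ hndB []]
  rw [hkeysA, hkeysB]
  set K := PySem.Set.ofList (ps.map (fun p => p.1)) with hK
  -- the sorted key list
  have hKsorted : PySem.List.sorted K (fun x => x) = PySem.Set.ofList (qs.map (fun p => p.1)) := by
    apply PySem.List.sorted_id_eq_of_perm_of_pairwise
    · rw [List.perm_ext_iff_of_nodup (PySem.Set.nodup_ofList _) (PySem.Set.nodup_ofList _)]
      intro a
      rw [PySem.Set.mem_ofList, PySem.Set.mem_ofList, List.mem_map, List.mem_map]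
      constructor <;> rintro ⟨p, hp, rfl⟩
      · exact ⟨p, hqsperm.mem_iff.mp hp, rfl⟩
      · exact ⟨p, hqsperm.mem_iff.mpr hp, rfl⟩
    · apply pv_pairwise_ofList
      rw [List.pairwise_map]
      exact PySem.List.sorted_pairwise _ _
  -- step 1: sorting A's items by key = mapping over the sorted key list
  have hstep1 : PySem.List.sorted
      (K.map (fun k => (k, (ps.filter (fun p => p.1 == k)).map (fun p => p.2)))) (fun p => p.1)
      = (PySem.List.sorted K (fun x => x)).map
          (fun k => (k, (ps.filter (fun p => p.1 == k)).map (fun p => p.2))) := by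
    apply PySem.List.sorted_eq_of_perm_of_pairwise_lt
    · exact List.Perm.map _ (PySem.List.sorted_perm K (fun x => x) false)
    · rw [List.pairwise_map]
      exact pv_pairwise_lt_of_le_nodup (PySem.List.sorted_pairwise K (fun x => x))
        (List.Perm.nodup_iff (PySem.List.sorted_perm K (fun x => x) false) |>.mpr (PySem.Set.nodup_ofList _))
  -- step 2: per-key, B's already-sorted run equals A's sorted value list
  have hstep2 : ∀ k, PySem.List.sorted ((ps.filter (fun p => p.1 == k)).map (fun p => p.2)) (fun x => x)
      = (qs.filter (fun p => p.1 == k)).map (fun p => p.2) := by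
    intro k
    apply PySem.List.sorted_id_eq_of_perm_of_pairwise
    · exact List.Perm.map _ (List.Perm.filter _ hqsperm)
    · have hq : qs.filter (fun p => p.1 == k)
          = (PySem.List.sorted ps (fun p => p.2)).filter (fun p => p.1 == k) := by
        rw [hqs]
        exact pv_filter_sorted (fun p : String × String => p.1) k (PySem.List.sorted ps (fun p => p.2))
      rw [hq, List.pairwise_map]
      exact List.Pairwise.filter _ (PySem.List.sorted_pairwise ps (fun p => p.2))
  -- assemble
  calc (PySem.List.sorted
          (K.map (fun k => (k, (ps.foldl (fun d p => d.modify p.1 [] (fun l => l ++ [p.2])) PySem.Dict.empty).getD k [])))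
          (fun p => p.1)).map (fun p => (p.1, PySem.List.sorted p.2 (fun x => x)))
      = ((PySem.List.sorted K (fun x => x)).map
          (fun k => (k, (ps.filter (fun p => p.1 == k)).map (fun p => p.2)))).map
            (fun p => (p.1, PySem.List.sorted p.2 (fun x => x))) := by
        rw [show (fun k => (k, (ps.foldl (fun d p => d.modify p.1 [] (fun l => l ++ [p.2])) PySem.Dict.empty).getD k []))
            = (fun k => (k, (ps.filter (fun p => p.1 == k)).map (fun p => p.2))) from funext (fun k => by rw [hgetA k]),
          hstep1]
    _ = (PySem.Set.ofList (qs.map (fun p => p.1))).map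
          (fun k => (k, (qs.foldl (fun d p => d.modify p.1 [] (fun l => l ++ [p.2])) PySem.Dict.empty).getD k [])) := by
        rw [← hKsorted, List.map_map]
        apply List.map_congr_left
        intro k _
        simp only [Function.comp]
        rw [hstep2 k, hgetB k]

-- under Pre_TC both ports' parsing loops produce exactly files.map pvParse
theorem pv_foldA (files : List String) (hpre : Pre_TC files) :
    files.foldl (fun d name =>
      ((pvUnpack2? name).map (fun p => d.modify p.1 [] (fun l => l ++ [p.2]))).getD d) PySem.Dict.empty
    = (files.map pvParse).foldl (fun d p => d.modify p.1 [] (fun l => l ++ [p.2])) PySem.Dict.empty := by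
  rw [List.foldl_map]
  apply PySem.List.foldl_congr_mem
  intro d name hn
  rw [pv_unpack_eq name (hpre name hn)]
  simp

theorem pv_foldB (files : List String) (hpre : Pre_TC files) :
    files.foldl (fun acc name =>
      ((pvUnpack2? name).map (fun p => acc ++ [p])).getD acc) ([] : List (String × String))
    = files.map pvParse := by
  have h : files.foldl (fun acc name =>
      ((pvUnpack2? name).map (fun p => acc ++ [p])).getD acc) ([] : List (String × String))
      = files.foldl (fun acc name => acc ++ [pvParse name]) [] := by
    apply PySem.List.foldl_congr_mem
    intro acc name hn
    rw [pv_unpack_eq name (hpre name hn)]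
    simp
  rw [h, PySem.List.foldl_append_singleton_eq_map]
  simp

-- ===== VERDICT (by name: the statement is the Claim_ definition above) =====
theorem TC_spec : Claim_equal_TC := by
  intro files _hdom hpre
  unfold Spec_TC TC TC_alt
  rw [pv_foldA files hpre, pv_foldB files hpre]
  exact pv_group_eq (files.map pvParse)
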